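-- pv_equiv track=rewrite | github.com/dnabre/advent_2019 | aoc_24.py | calc_biodiversity_rating
-- ===== SOURCE A (Python) =====
-- BUG = '#'
--
-- def calc_biodiversity_rating(w):
--     tile_i = 0
--     total_bio_rating = 0
--     for r in range(len(w)):
--         for c in range(len(w[0])):
--             if (w[r][c] == BUG):
--                 total_bio_rating += pow(2, tile_i)
--             tile_i += 1
--     return total_bio_rating
-- ===== SOURCE B (Python) =====
-- BUG = '#'
--
-- def calc_biodiversity_rating(w):
--     n = len(w[0]) if w else 0
--     total = 0
--     for row in reversed(w):
--         for c in reversed(range(n)):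
--             total = 2 * total + (row[c] == BUG)
--     return total
-- ===== Notes on version B (the rewrite author's own statement) =====
-- stated objective: simpler
-- what changed: Replaces the index/counter loop with explicit pow(2, tile_i) by a back-to-front Horner scheme: walk rows in reverse and columns in reversed(range(n)) folding total = 2*total + (row[c] == BUG), so no tile index and no powers are ever computed.
import Mathlib
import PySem

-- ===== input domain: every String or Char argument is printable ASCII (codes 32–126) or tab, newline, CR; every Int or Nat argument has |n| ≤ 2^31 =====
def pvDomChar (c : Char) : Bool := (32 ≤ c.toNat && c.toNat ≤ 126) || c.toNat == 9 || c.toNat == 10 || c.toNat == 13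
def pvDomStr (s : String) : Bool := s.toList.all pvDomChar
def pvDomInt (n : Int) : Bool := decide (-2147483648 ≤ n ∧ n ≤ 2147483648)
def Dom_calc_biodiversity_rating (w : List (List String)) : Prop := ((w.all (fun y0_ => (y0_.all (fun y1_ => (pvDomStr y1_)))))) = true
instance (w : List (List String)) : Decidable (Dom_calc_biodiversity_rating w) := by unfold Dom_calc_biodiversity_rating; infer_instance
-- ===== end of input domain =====

-- B replaces A's tile-index counter and pow(2, tile_i) by a back-to-front Horner fold
-- (total = 2*total + bit) over the same tiles, for simplicity.

-- ===== PORT A =====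
-- nested index loops over range(len(w)) × range(len(w[0])), state (tile_i, total);
-- pow(2, tile_i) with tile_i ≥ 0 throughout, so 2 ^ tile_i.toNat is exact
def calc_biodiversity_rating (w : List (List String)) : Int :=
  (((PySem.List.pyRange 0 (w.length : Int) 1).foldl (fun st r =>
      (PySem.List.pyRange 0 ((PySem.List.pyGetD w 0 []).length : Int) 1).foldl (fun st c =>
        if PySem.List.pyGetD (PySem.List.pyGetD w r []) c "" = "#" then
          (st.1 + 1, st.2 + 2 ^ st.1.toNat)
        else
          (st.1 + 1, st.2)) st)
    (((0 : Int), (0 : Int)))).2)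

-- ===== PORT B =====
-- reversed rows, reversed(range(n)) columns, Horner step 2*total + bit;
-- row[c] with 0 ≤ c is pyGetD (in range on every input Pre_ admits, like A)
def calc_biodiversity_rating_alt (w : List (List String)) : Int :=
  let n : Int := if w ≠ [] then ((PySem.List.pyGetD w 0 []).length : Int) else 0
  w.reverse.foldl (fun total row =>
    (PySem.List.pyRange 0 n 1).reverse.foldl
      (fun total c => 2 * total + (if PySem.List.pyGetD row c "" = "#" then 1 else 0))
      total) 0

-- ===== PRECONDITION & SPEC =====
-- Pre_ excludes exactly the ragged grids on which A (and B) raise IndexError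
-- (some row shorter than row 0).
def Pre_calc_biodiversity_rating (w : List (List String)) : Prop :=
  ∀ row ∈ w, (w.headD []).length ≤ row.length
instance (w : List (List String)) : Decidable (Pre_calc_biodiversity_rating w) := by
  unfold Pre_calc_biodiversity_rating; infer_instance

def pvWitness_calc_biodiversity_rating : List (List String) :=
  [["#", "."], [".", "#"]]

def Spec_calc_biodiversity_rating (w : List (List String)) (out : Int) : Prop :=
  out = calc_biodiversity_rating_alt w
instance (w : List (List String)) (out : Int) : Decidable (Spec_calc_biodiversity_rating w out) := by
  unfold Spec_calc_biodiversity_rating; infer_instance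

-- ===== CLAIM (what is proved, stated in full; the proofs are below) =====
def Claim_equal_calc_biodiversity_rating : Prop :=
  ∀ (w : List (List String)), Dom_calc_biodiversity_rating w →
    Pre_calc_biodiversity_rating w →
    Spec_calc_biodiversity_rating w (calc_biodiversity_rating w)

-- ===== LEMMAS AND PROOFS =====

-- the per-tile bit
def pvBit (tile : String) : Int := if tile = "#" then 1 else 0

-- Horner value of a tile list: pvH ts = Σ_k pvBit ts[k] * 2^k
def pvH (ts : List String) : Int :=
  ts.reverse.foldl (fun total tile => 2 * total + pvBit tile) 0

lemma pvH_cons (x : String) (ts : List String) :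
    pvH (x :: ts) = pvBit x + 2 * pvH ts := by
  simp [pvH, List.foldl_append]
  ring

-- nested reversed Horner folds compute the Horner fold of the flattened grid
lemma pvB_flat (rows : List (List String)) (acc : Int) :
    rows.reverse.foldl (fun total row =>
        row.reverse.foldl (fun total tile => 2 * total + pvBit tile) total) acc
      = rows.flatten.reverse.foldl (fun total tile => 2 * total + pvBit tile) acc := by
  induction rows generalizing acc with
  | nil => rfl
  | cons r rs ih =>
      simp only [List.reverse_cons, List.flatten_cons, List.reverse_append,
        List.foldl_append, List.foldl_cons, List.foldl_nil]
      rw [ih]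

-- A's pair-state fold: the counter advances by the length, the total adds 2^i * pvH
lemma pvA_fold (ts : List String) (i t : Int) (hi : 0 ≤ i) :
    (ts.foldl (fun st tile =>
        if tile = "#" then (st.1 + 1, st.2 + 2 ^ st.1.toNat) else (st.1 + 1, st.2))
      (i, t))
      = (i + ts.length, t + 2 ^ i.toNat * pvH ts) := by
  induction ts generalizing i t with
  | nil => simp [pvH]
  | cons x xs ih =>
      have ht : (i + 1).toNat = i.toNat + 1 := by omega
      simp only [List.foldl_cons]
      split_ifs with hx <;>
        rw [ih (i + 1) _ (by omega)] <;>
        refine Prod.ext ?_ ?_ <;>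
        simp [pvH_cons, pvBit, hx, ht, pow_succ] <;> ring

-- [row[c] for c in range(m)] = row.take m, when m ≤ len(row)
lemma pvMap_range_take (row : List String) (m : Nat) (hm : m ≤ row.length) :
    (PySem.List.pyRange 0 (m : Int) 1).map (fun c => PySem.List.pyGetD row c "")
      = row.take m := by
  have hlen : (((row.take m).length : Nat) : Int) = (m : Int) := by
    simp [List.length_take, Nat.min_eq_left hm]
  have h := PySem.List.map_pyGetD_pyRange_zero' (row.take m) ""
  rw [hlen] at h
  rw [← h]
  apply List.map_congr_left
  intro j hj
  rw [PySem.List.mem_pyRange_one] at hj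
  have hj1 : 0 ≤ j := hj.1
  have hjm : j < (m : Int) := hj.2
  have hj2 : j < (((row.take m).length : Nat) : Int) := by rw [hlen]; exact hjm
  have hj3 : j < ((row.length : Nat) : Int) := by
    have : (m : Int) ≤ (row.length : Int) := by exact_mod_cast hm
    omega
  rw [PySem.List.pyGetD_eq_getElem row "" hj1 hj3,
      PySem.List.pyGetD_eq_getElem (row.take m) "" hj1 hj2]
  rw [List.getElem_take]

-- range(len(w[0])) indexing loop over a row = fold over row.take m  (used for A)
lemma pvFold_range_take {b : Type} (row : List String) (m : Nat) (hm : m ≤ row.length)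
    (f : b → String → b) (init : b) :
    (PySem.List.pyRange 0 (m : Int) 1).foldl
        (fun acc j => f acc (PySem.List.pyGetD row j "")) init
      = (row.take m).foldl f init := by
  rw [← List.foldl_map (f := fun c => PySem.List.pyGetD row c "") (g := f),
      pvMap_range_take row m hm]

-- ===== VERDICT (by name: the statement is the Claim_ definition above) =====
theorem calc_biodiversity_rating_spec : Claim_equal_calc_biodiversity_rating := by
  intro w _ hpre
  unfold Spec_calc_biodiversity_rating
  rcases hw : w with _ | ⟨r0, rs⟩
  · rfl
  rw [← hw]
  have hne : w ≠ [] := by rw [hw]; simp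
  set m : Nat := (PySem.List.pyGetD w 0 []).length with hmdef
  have hrow : ∀ row ∈ w, m ≤ row.length := by
    intro row hr
    have : (w.headD []).length = m := by
      rw [hmdef, PySem.List.pyGetD_zero]
      cases w <;> rfl
    rw [← this]; exact hpre row hr
  -- A reduces to the pair fold over the flattened truncated grid
  have hA : calc_biodiversity_rating w
      = ((((w.map (fun row => row.take m)).flatten).foldl (fun st tile =>
          if tile = "#" then (st.1 + 1, st.2 + 2 ^ st.1.toNat) else (st.1 + 1, st.2))
          ((0 : Int), (0 : Int))).2) := by
    unfold calc_biodiversity_rating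
    rw [PySem.List.foldl_pyRange_zero_pyGetD' w []
      (fun st row => (PySem.List.pyRange 0 (m : Int) 1).foldl (fun st c =>
        if PySem.List.pyGetD row c "" = "#" then (st.1 + 1, st.2 + 2 ^ st.1.toNat)
        else (st.1 + 1, st.2)) st) ((0 : Int), (0 : Int))]
    rw [List.foldl_flatten, List.foldl_map]
    congr 1
    apply PySem.List.foldl_congr_mem
    intro st row hr
    exact pvFold_range_take row m (hrow row hr)
      (fun st tile => if tile = "#" then (st.1 + 1, st.2 + 2 ^ st.1.toNat)
        else (st.1 + 1, st.2)) st
  -- B reduces to the Horner fold over the same flattened grid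
  have hB : calc_biodiversity_rating_alt w
      = pvH ((w.map (fun row => row.take m)).flatten) := by
    simp only [calc_biodiversity_rating_alt]
    rw [if_pos hne]
    rw [PySem.List.foldl_congr_mem _ _
      (fun (total : Int) row => ((row.take m).reverse.foldl
        (fun total tile => 2 * total + pvBit tile) total)) 0 ?_]
    · have : (fun (total : Int) (row : List String) => ((row.take m).reverse.foldl
          (fun total tile => 2 * total + pvBit tile) total))
        = fun (total : Int) (row : List String) =>
            (((fun row : List String => row.take m) row).reverse.foldl
              (fun total tile => 2 * total + pvBit tile) total) := rfl
      rw [this, show w.reverse.foldl (fun (total : Int) (row : List String) =>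
            (((fun row : List String => row.take m) row).reverse.foldl
              (fun total tile => 2 * total + pvBit tile) total)) 0
          = (w.map (fun row => row.take m)).reverse.foldl
              (fun (total : Int) (row : List String) => (row.reverse.foldl
                (fun total tile => 2 * total + pvBit tile) total)) 0 by
        rw [← List.map_reverse, List.foldl_map]]
      rw [pvB_flat]
      rfl
    · intro acc row hr
      show (PySem.List.pyRange 0 (m : Int) 1).reverse.foldl
          (fun total c => 2 * total + pvBit (PySem.List.pyGetD row c "")) acc
        = (row.take m).reverse.foldl (fun total tile => 2 * total + pvBit tile) acc
      rw [← List.foldl_map (f := fun c => PySem.List.pyGetD row c "")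
            (g := fun (total : Int) tile => 2 * total + pvBit tile),
          List.map_reverse, pvMap_range_take row m (hrow row (List.mem_reverse.mp hr))]
  rw [hA, hB, pvA_fold _ 0 0 le_rfl]
  simp
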